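-- pv_equiv track=rewrite | github.com/sigven/pcgr | scripts/annoutils.py | get_correct_cpg_transcript
-- ===== SOURCE A (Python) =====
-- def get_correct_cpg_transcript(vep_csq_records):
--     """
--     Function that considers an array of VEP CSQ records and picks most relevant consequence (and gene) from
--     neighbouring genes/transcripts of relevance for cancer predisposition (cpg = cancer predisposition gene)
--     """
--
--     csq_idx = 0
--     if len(vep_csq_records) == 1:
--         return csq_idx
--
--     # some variants iare assigned multiple transcript consequences
--     # if cancer predisposition genes are in the vicinity of other genes, choose the cancer predisposition gene
--     # if there are neighbouring cancer-predispositon genes, choose custom gene, preferring coding change (see below, KLLN/PTEN, XPC/TMEM43, NTHL1/TSC2)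
--     csq_idx_dict = {}
--     for g in ['KLLN', 'PTEN', 'XPC', 'TMEM43', 'NTHL1', 'TSC2']:
--         csq_idx_dict[g] = {}
--         csq_idx_dict[g]['idx'] = -1
--         csq_idx_dict[g]['coding'] = False
--
--     j = 0
--     while j < len(vep_csq_records):
--         if 'CANCER_PREDISPOSITION_SOURCE' in vep_csq_records[j].keys() or 'GE_PANEL_ID' in vep_csq_records[j].keys():
--             csq_idx = j
--             if 'SYMBOL' in vep_csq_records[j].keys():
--                 if vep_csq_records[j]['SYMBOL'] in csq_idx_dict.keys():
--                     csq_idx_dict[str(vep_csq_records[j]['SYMBOL'])]['idx'] = j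
--                     if vep_csq_records[j]['CODING_STATUS'] == 'coding':
--                         csq_idx = j  # prefer coding on over anything else
--                         csq_idx_dict[str(vep_csq_records[j]
--                                          ['SYMBOL'])]['coding'] = True
--         j = j + 1
--
--     if csq_idx_dict['KLLN']['idx'] != -1 and csq_idx_dict['PTEN']['idx'] != -1:
--         csq_idx = csq_idx_dict['PTEN']['idx']
--         if csq_idx_dict['KLLN']['coding'] is True:
--             csq_idx = csq_idx_dict['KLLN']['idx']
--
--     if csq_idx_dict['XPC']['idx'] != -1 and csq_idx_dict['TMEM43']['idx'] != -1:
--         csq_idx = csq_idx_dict['XPC']['idx']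
--         if csq_idx_dict['TMEM43']['coding'] is True:
--             csq_idx = csq_idx_dict['TMEM43']['idx']
--
--     if csq_idx_dict['TSC2']['idx'] != -1 and csq_idx_dict['NTHL1']['idx'] != -1:
--         csq_idx = csq_idx_dict['TSC2']['idx']
--         if csq_idx_dict['NTHL1']['coding'] is True:
--             csq_idx = csq_idx_dict['NTHL1']['idx']
--
--     if csq_idx is None:
--         csq_idx = 0
--     return csq_idx
-- ===== SOURCE B (Python) =====
-- _PAIRS = [('PTEN', 'KLLN'), ('XPC', 'TMEM43'), ('TSC2', 'NTHL1')]
--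
--
-- def get_correct_cpg_transcript(vep_csq_records):
--     if len(vep_csq_records) == 1:
--         return 0
--     qual = [(j, rec) for j, rec in enumerate(vep_csq_records)
--             if 'CANCER_PREDISPOSITION_SOURCE' in rec or 'GE_PANEL_ID' in rec]
--
--     def occ(g):
--         return [(j, rec['CODING_STATUS'] == 'coding')
--                 for j, rec in qual if rec.get('SYMBOL') == g]
--
--     for default, preferred in reversed(_PAIRS):
--         od, op = occ(default), occ(preferred)
--         if od and op:
--             return op[-1][0] if any(c for _, c in op) else od[-1][0]
--     return qual[-1][0] if qual else 0
-- ===== Notes on version B (the rewrite author's own statement) =====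
-- stated objective: alternative
-- what changed: B keeps no mutable per-gene state: instead of A's forward index loop with a pre-seeded six-gene nested dict and three sequential override blocks, it builds the list of qualifying records once, answers per-gene occurrence queries declaratively (last index = occ[-1], coding = any(...)), and walks the pair table in reverse with an early return, falling back to the last qualifying index.
import Mathlib
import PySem

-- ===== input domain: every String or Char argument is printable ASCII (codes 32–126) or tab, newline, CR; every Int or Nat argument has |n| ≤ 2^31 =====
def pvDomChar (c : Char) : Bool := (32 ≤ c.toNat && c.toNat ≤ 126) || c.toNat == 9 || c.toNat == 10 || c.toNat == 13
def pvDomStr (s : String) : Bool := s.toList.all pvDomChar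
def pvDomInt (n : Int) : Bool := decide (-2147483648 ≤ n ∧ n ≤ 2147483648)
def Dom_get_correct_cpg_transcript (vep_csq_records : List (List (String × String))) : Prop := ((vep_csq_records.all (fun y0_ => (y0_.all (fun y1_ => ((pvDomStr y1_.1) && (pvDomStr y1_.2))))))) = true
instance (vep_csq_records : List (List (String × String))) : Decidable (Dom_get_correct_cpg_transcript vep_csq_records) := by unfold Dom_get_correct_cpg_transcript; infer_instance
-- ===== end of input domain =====

-- B drops A's mutable per-gene state for declarative occurrence queries plus a reversed early-return pair walk; return values proved equal on Pre_.

-- ===== PORT A =====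
-- the six special genes, in A's initialisation order
def pvGenes : List String := ["KLLN", "PTEN", "XPC", "TMEM43", "NTHL1", "TSC2"]

-- A's nested dict csq_idx_dict[g] = {'idx': …, 'coding': …} is ported with the pair (idx, coding) as value
def pvInitDictA : PySem.Dict String (Int × Bool) :=
  pvGenes.foldl (fun d g => d.insert g (-1, false)) PySem.Dict.empty

-- the body of A's `while j < len(vep_csq_records)` loop; state = (csq_idx, csq_idx_dict)
def pvStepA (vep_csq_records : List (List (String × String)))
    (st : Int × PySem.Dict String (Int × Bool)) (j : Int) :
    Int × PySem.Dict String (Int × Bool) :=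
  let r := PySem.Dict.mk (PySem.List.pyGetD vep_csq_records j [])
  if r.contains "CANCER_PREDISPOSITION_SOURCE" || r.contains "GE_PANEL_ID" then
    if r.contains "SYMBOL" then
      let sym := r.getD "SYMBOL" ""
      if st.2.contains sym then
        let d1 := st.2.insert sym (j, (st.2.getD sym (-1, false)).2)
        if r.getD "CODING_STATUS" "" == "coding" then
          (j, d1.insert sym (j, true))
        else (j, d1)
      else (j, st.2)
    else (j, st.2)
  else st

def get_correct_cpg_transcript (vep_csq_records : List (List (String × String))) : Int :=
  let csq_idx : Int := 0
  if vep_csq_records.length == 1 then csq_idx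
  else
    let st := (PySem.List.pyRange 0 (vep_csq_records.length : Int) 1).foldl
      (pvStepA vep_csq_records) (csq_idx, pvInitDictA)
    let d := st.2
    let c1 :=
      if (d.getD "KLLN" (-1, false)).1 != -1 && (d.getD "PTEN" (-1, false)).1 != -1 then
        if (d.getD "KLLN" (-1, false)).2 then (d.getD "KLLN" (-1, false)).1
        else (d.getD "PTEN" (-1, false)).1
      else st.1
    let c2 :=
      if (d.getD "XPC" (-1, false)).1 != -1 && (d.getD "TMEM43" (-1, false)).1 != -1 then
        if (d.getD "TMEM43" (-1, false)).2 then (d.getD "TMEM43" (-1, false)).1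
        else (d.getD "XPC" (-1, false)).1
      else c1
    let c3 :=
      if (d.getD "TSC2" (-1, false)).1 != -1 && (d.getD "NTHL1" (-1, false)).1 != -1 then
        if (d.getD "NTHL1" (-1, false)).2 then (d.getD "NTHL1" (-1, false)).1
        else (d.getD "TSC2" (-1, false)).1
      else c2
    -- `if csq_idx is None: csq_idx = 0` is dead code (csq_idx is always an int) and ports to nothing
    c3

-- ===== PORT B =====
def pvPairsB : List (String × String) := [("PTEN", "KLLN"), ("XPC", "TMEM43"), ("TSC2", "NTHL1")]

-- 'CANCER_PREDISPOSITION_SOURCE' in rec or 'GE_PANEL_ID' in rec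
def pvIsQual (rec : List (String × String)) : Bool :=
  (PySem.Dict.mk rec).contains "CANCER_PREDISPOSITION_SOURCE"
    || (PySem.Dict.mk rec).contains "GE_PANEL_ID"

-- qual = [(j, rec) for j, rec in enumerate(vep_csq_records) if …]
def pvQual (vep_csq_records : List (List (String × String))) :
    List (Int × List (String × String)) :=
  (PySem.List.enumerate vep_csq_records 0).filter (fun jr => pvIsQual jr.2)

-- occ(g); rec['CODING_STATUS'] is ported as getD "" — exact under Pre_ (the key is present on every queried record)
def pvOcc (qual : List (Int × List (String × String))) (g : String) : List (Int × Bool) :=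
  (qual.filter (fun jr => (PySem.Dict.mk jr.2).get? "SYMBOL" == some g)).map
    (fun jr => (jr.1, (PySem.Dict.mk jr.2).getD "CODING_STATUS" "" == "coding"))

-- the `for default, preferred in reversed(_PAIRS)` loop with its early returns, plus the final fallback
def pvPickB (qual : List (Int × List (String × String))) :
    List (String × String) → Int
  | [] => if !qual.isEmpty then (PySem.List.pyGetD qual (-1) (0, [])).1 else 0
  | (dflt, pref) :: rest =>
    let od := pvOcc qual dflt
    let op := pvOcc qual pref
    if !od.isEmpty && !op.isEmpty then
      if op.any (fun c => c.2) then (PySem.List.pyGetD op (-1) (0, false)).1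
      else (PySem.List.pyGetD od (-1) (0, false)).1
    else pvPickB qual rest

def get_correct_cpg_transcript_alt (vep_csq_records : List (List (String × String))) : Int :=
  if vep_csq_records.length == 1 then 0
  else pvPickB (pvQual vep_csq_records) pvPairsB.reverse

-- ===== PRECONDITION & SPEC =====
-- Pre_ excludes exactly the records where Python A raises KeyError: a record that carries
-- CANCER_PREDISPOSITION_SOURCE/GE_PANEL_ID and one of the six special SYMBOLs but no CODING_STATUS.
def Pre_get_correct_cpg_transcript (vep_csq_records : List (List (String × String))) : Prop :=
  vep_csq_records.length = 1 ∨
  ∀ rec ∈ vep_csq_records,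
    ((PySem.Dict.mk rec).contains "CANCER_PREDISPOSITION_SOURCE"
      || (PySem.Dict.mk rec).contains "GE_PANEL_ID") = true →
    (((PySem.Dict.mk rec).get? "SYMBOL").any
      (fun s => decide (s ∈ ["KLLN", "PTEN", "XPC", "TMEM43", "NTHL1", "TSC2"]))) = true →
    (PySem.Dict.mk rec).contains "CODING_STATUS" = true
instance (vep_csq_records : List (List (String × String))) : Decidable (Pre_get_correct_cpg_transcript vep_csq_records) := by unfold Pre_get_correct_cpg_transcript; infer_instance

def pvWitness_get_correct_cpg_transcript : (List (List (String × String))) :=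
  [[("GE_PANEL_ID", "x"), ("SYMBOL", "PTEN"), ("CODING_STATUS", "noncoding")],
   [("CANCER_PREDISPOSITION_SOURCE", "x"), ("SYMBOL", "KLLN"), ("CODING_STATUS", "coding")]]

def Spec_get_correct_cpg_transcript (vep_csq_records : List (List (String × String))) (out : Int) : Prop := out = get_correct_cpg_transcript_alt vep_csq_records
instance (vep_csq_records : List (List (String × String))) (out : Int) : Decidable (Spec_get_correct_cpg_transcript vep_csq_records out) := by unfold Spec_get_correct_cpg_transcript; infer_instance

-- ===== CLAIM (what is proved, stated in full; the proofs are below) =====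
def Claim_equal_get_correct_cpg_transcript : Prop := ∀ (vep_csq_records : List (List (String × String))), Dom_get_correct_cpg_transcript vep_csq_records → Pre_get_correct_cpg_transcript vep_csq_records → Spec_get_correct_cpg_transcript vep_csq_records (get_correct_cpg_transcript vep_csq_records)

-- ===== LEMMAS AND PROOFS =====

-- last index of an occurrence list (−1 when empty) and its coding flag; the shapes A's dict entries take
def pvIdxOf (l : List (Int × Bool)) : Int :=
  if !l.isEmpty then (PySem.List.pyGetD l (-1) (0, false)).1 else -1

def pvCodOf (l : List (Int × Bool)) : Bool := l.any (fun c => c.2)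

-- A's loop body re-indexed by the enumerated pair instead of the position
def pvStepA' (st : Int × PySem.Dict String (Int × Bool))
    (jr : Int × List (String × String)) : Int × PySem.Dict String (Int × Bool) :=
  let r := PySem.Dict.mk jr.2
  if r.contains "CANCER_PREDISPOSITION_SOURCE" || r.contains "GE_PANEL_ID" then
    if r.contains "SYMBOL" then
      let sym := r.getD "SYMBOL" ""
      if st.2.contains sym then
        let d1 := st.2.insert sym (jr.1, (st.2.getD sym (-1, false)).2)
        if r.getD "CODING_STATUS" "" == "coding" then
          (jr.1, d1.insert sym (jr.1, true))
        else (jr.1, d1)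
      else (jr.1, st.2)
    else (jr.1, st.2)
  else st

theorem pvFoldA_eq (recs : List (List (String × String))) :
    (PySem.List.pyRange 0 (recs.length : Int) 1).foldl (pvStepA recs) (0, pvInitDictA)
      = (PySem.List.enumerate recs 0).foldl pvStepA' (0, pvInitDictA) := by
  rw [PySem.List.enumerate_eq_map_pyRange recs [], List.foldl_map]
  simp only [PySem.List.len_eq]
  rfl

theorem pvInit_get? (s : String) :
    pvInitDictA.get? s = if s ∈ pvGenes then some (-1, false) else none := by
  have h : pvInitDictA = PySem.Dict.mk
      [("KLLN", ((-1 : Int), false)), ("PTEN", (-1, false)), ("XPC", (-1, false)),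
       ("TMEM43", (-1, false)), ("NTHL1", (-1, false)), ("TSC2", (-1, false))] := by decide
  rw [h]
  by_cases h1 : s = "KLLN"; · subst h1; decide
  by_cases h2 : s = "PTEN"; · subst h2; decide
  by_cases h3 : s = "XPC"; · subst h3; decide
  by_cases h4 : s = "TMEM43"; · subst h4; decide
  by_cases h5 : s = "NTHL1"; · subst h5; decide
  by_cases h6 : s = "TSC2"; · subst h6; decide
  simp [pvGenes, PySem.Dict.get?,
    Ne.symm h1, Ne.symm h2, Ne.symm h3, Ne.symm h4, Ne.symm h5, Ne.symm h6, h1, h2, h3, h4, h5, h6]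

theorem pvStepA'_skip (st : Int × PySem.Dict String (Int × Bool))
    (x : Int × List (String × String)) (h : pvIsQual x.2 = false) :
    pvStepA' st x = st := by
  have h' : ((PySem.Dict.mk x.2).contains "CANCER_PREDISPOSITION_SOURCE"
      || (PySem.Dict.mk x.2).contains "GE_PANEL_ID") = false := h
  unfold pvStepA'
  simp only [h', Bool.false_eq_true, if_false]

theorem pvStepA'_nosym (st : Int × PySem.Dict String (Int × Bool))
    (x : Int × List (String × String)) (hqc : pvIsQual x.2 = true)
    (hsym : (PySem.Dict.mk x.2).get? "SYMBOL" = none) :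
    pvStepA' st x = (x.1, st.2) := by
  have hqc' : ((PySem.Dict.mk x.2).contains "CANCER_PREDISPOSITION_SOURCE"
      || (PySem.Dict.mk x.2).contains "GE_PANEL_ID") = true := hqc
  have hc : (PySem.Dict.mk x.2).contains "SYMBOL" = false := by
    rw [PySem.Dict.contains_eq_isSome_get?, hsym]; rfl
  unfold pvStepA'
  simp only [hqc', if_true, hc, Bool.false_eq_true, if_false]

theorem pvStepA'_notin (st : Int × PySem.Dict String (Int × Bool))
    (x : Int × List (String × String)) (sym : String) (hqc : pvIsQual x.2 = true)
    (hsym : (PySem.Dict.mk x.2).get? "SYMBOL" = some sym)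
    (hcont : st.2.contains sym = false) :
    pvStepA' st x = (x.1, st.2) := by
  have hqc' : ((PySem.Dict.mk x.2).contains "CANCER_PREDISPOSITION_SOURCE"
      || (PySem.Dict.mk x.2).contains "GE_PANEL_ID") = true := hqc
  have hc : (PySem.Dict.mk x.2).contains "SYMBOL" = true := by
    rw [PySem.Dict.contains_eq_isSome_get?, hsym]; rfl
  have hgd : (PySem.Dict.mk x.2).getD "SYMBOL" "" = sym := by
    rw [PySem.Dict.getD_eq_get?_getD, hsym]; rfl
  unfold pvStepA'
  simp only [hqc', if_true, hc, hgd, hcont, Bool.false_eq_true, if_false]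

theorem pvStepA'_insert (st : Int × PySem.Dict String (Int × Bool))
    (x : Int × List (String × String)) (sym : String) (hqc : pvIsQual x.2 = true)
    (hsym : (PySem.Dict.mk x.2).get? "SYMBOL" = some sym)
    (hcont : st.2.contains sym = true) :
    pvStepA' st x = (x.1, st.2.insert sym
      (x.1, (st.2.getD sym (-1, false)).2
              || ((PySem.Dict.mk x.2).getD "CODING_STATUS" "" == "coding"))) := by
  have hqc' : ((PySem.Dict.mk x.2).contains "CANCER_PREDISPOSITION_SOURCE"
      || (PySem.Dict.mk x.2).contains "GE_PANEL_ID") = true := hqc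
  have hc : (PySem.Dict.mk x.2).contains "SYMBOL" = true := by
    rw [PySem.Dict.contains_eq_isSome_get?, hsym]; rfl
  have hgd : (PySem.Dict.mk x.2).getD "SYMBOL" "" = sym := by
    rw [PySem.Dict.getD_eq_get?_getD, hsym]; rfl
  unfold pvStepA'
  simp only [hqc', hc, hgd, hcont, if_true]
  cases hcod : ((PySem.Dict.mk x.2).getD "CODING_STATUS" "" == "coding") with
  | false => simp
  | true => simp [PySem.Dict.insert_insert_self]

theorem pvIdxOf_append (l : List (Int × Bool)) (y : Int × Bool) :
    pvIdxOf (l ++ [y]) = y.1 := by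
  simp [pvIdxOf, PySem.List.pyGetD_neg_one_append_singleton]

theorem pvCodOf_append (l : List (Int × Bool)) (y : Int × Bool) :
    pvCodOf (l ++ [y]) = (pvCodOf l || y.2) := by
  simp [pvCodOf]

-- characterization of A's loop state in terms of B's declarative queries
theorem pvFoldA_char (l : List (Int × List (String × String)))
    (hpos : ∀ jr ∈ l, (0 : Int) ≤ jr.1) :
    (l.foldl pvStepA' (0, pvInitDictA)).1
        = (if !(l.filter (fun jr => pvIsQual jr.2)).isEmpty
           then (PySem.List.pyGetD (l.filter (fun jr => pvIsQual jr.2)) (-1) (0, [])).1 else 0) ∧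
    ∀ s, (l.foldl pvStepA' (0, pvInitDictA)).2.get? s
        = if s ∈ pvGenes
          then some (pvIdxOf (pvOcc (l.filter (fun jr => pvIsQual jr.2)) s),
                     pvCodOf (pvOcc (l.filter (fun jr => pvIsQual jr.2)) s))
          else none := by
  induction l using List.reverseRecOn with
  | nil =>
      refine ⟨rfl, fun s => ?_⟩
      simp only [List.filter_nil, List.foldl_nil]
      exact pvInit_get? s
  | append_singleton l x ih =>
      obtain ⟨ih1, ih2⟩ := ih (fun jr hjr => hpos jr (List.mem_append_left _ hjr))
      have hx : (0 : Int) ≤ x.1 := hpos x (List.mem_append_right _ (List.mem_singleton_self x))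
      rw [List.foldl_append, List.foldl_cons, List.foldl_nil, List.filter_append]
      by_cases hq : pvIsQual x.2
      case neg =>
        rw [pvStepA'_skip _ x (by simpa using hq)]
        simp only [List.filter_cons, List.filter_nil, hq, Bool.false_eq_true, if_false,
          List.append_nil]
        exact ⟨ih1, ih2⟩
      case pos =>
        simp only [List.filter_cons, List.filter_nil, hq, if_true]
        have hbase : (if !((l.filter (fun jr => pvIsQual jr.2)) ++ [x]).isEmpty
            then (PySem.List.pyGetD ((l.filter (fun jr => pvIsQual jr.2)) ++ [x]) (-1) (0, [])).1
            else 0) = x.1 := by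
          simp [PySem.List.pyGetD_neg_one_append_singleton]
        rw [hbase]
        cases hsym : (PySem.Dict.mk x.2).get? "SYMBOL" with
        | none =>
            rw [pvStepA'_nosym _ x hq hsym]
            refine ⟨rfl, fun s => ?_⟩
            have hocc : pvOcc ((l.filter (fun jr => pvIsQual jr.2)) ++ [x]) s
                = pvOcc (l.filter (fun jr => pvIsQual jr.2)) s := by
              simp [pvOcc, List.filter_append, hsym]
            rw [hocc]
            exact ih2 s
        | some sym =>
            by_cases hg : sym ∈ pvGenes
            · have hcont : (l.foldl pvStepA' (0, pvInitDictA)).2.contains sym = true := by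
                rw [PySem.Dict.contains_eq_isSome_get?, ih2 sym, if_pos hg]; rfl
              have hgetD : (l.foldl pvStepA' (0, pvInitDictA)).2.getD sym (-1, false)
                  = (pvIdxOf (pvOcc (l.filter (fun jr => pvIsQual jr.2)) sym),
                     pvCodOf (pvOcc (l.filter (fun jr => pvIsQual jr.2)) sym)) := by
                rw [PySem.Dict.getD_eq_get?_getD, ih2 sym, if_pos hg]; rfl
              have hoccs : pvOcc ((l.filter (fun jr => pvIsQual jr.2)) ++ [x]) sym
                  = pvOcc (l.filter (fun jr => pvIsQual jr.2)) sym
                    ++ [(x.1, (PySem.Dict.mk x.2).getD "CODING_STATUS" "" == "coding")] := by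
                simp [pvOcc, List.filter_append, hsym]
              have hoccne : ∀ t, t ≠ sym →
                  pvOcc ((l.filter (fun jr => pvIsQual jr.2)) ++ [x]) t
                    = pvOcc (l.filter (fun jr => pvIsQual jr.2)) t := by
                intro t ht
                simp [pvOcc, List.filter_append, hsym, Ne.symm ht]
              rw [pvStepA'_insert _ x sym hq hsym hcont, hgetD]
              refine ⟨rfl, fun s => ?_⟩
              rw [PySem.Dict.get?_insert]
              by_cases hs : s = sym
              · subst hs
                rw [if_pos rfl, if_pos hg, hoccs, pvIdxOf_append, pvCodOf_append]
              · rw [if_neg hs, hoccne s hs, ih2 s]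
            · have hcont : (l.foldl pvStepA' (0, pvInitDictA)).2.contains sym = false := by
                rw [PySem.Dict.contains_eq_isSome_get?, ih2 sym, if_neg hg]; rfl
              rw [pvStepA'_notin _ x sym hq hsym hcont]
              refine ⟨rfl, fun s => ?_⟩
              by_cases hs : s ∈ pvGenes
              · have hns : s ≠ sym := fun h => hg (h ▸ hs)
                have hocc : pvOcc ((l.filter (fun jr => pvIsQual jr.2)) ++ [x]) s
                    = pvOcc (l.filter (fun jr => pvIsQual jr.2)) s := by
                  simp [pvOcc, List.filter_append, hsym, Ne.symm hns]
                rw [hocc]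
                exact ih2 s
              · rw [ih2 s, if_neg hs, if_neg hs]

theorem pvOcc_pos (q : List (Int × List (String × String)))
    (hq : ∀ jr ∈ q, (0 : Int) ≤ jr.1) (g : String) :
    ∀ y ∈ pvOcc q g, (0 : Int) ≤ y.1 := by
  intro y hy
  unfold pvOcc at hy
  simp only [List.mem_map, List.mem_filter] at hy
  obtain ⟨jr, ⟨hjr, -⟩, rfl⟩ := hy
  exact hq jr hjr

theorem pvIdxOf_ne (l : List (Int × Bool)) (h : ∀ y ∈ l, (0 : Int) ≤ y.1) :
    (pvIdxOf l != -1) = !l.isEmpty := by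
  cases l with
  | nil => rfl
  | cons y ys =>
      have hne : (y :: ys) ≠ [] := by simp
      have hget : PySem.List.pyGetD (y :: ys) (-1) ((0 : Int), false) = (y :: ys).getLast hne :=
        PySem.List.pyGetD_neg_one _ _ hne
      have hge : (0 : Int) ≤ ((y :: ys).getLast hne).1 := h _ (List.getLast_mem hne)
      have hne' : ((y :: ys).getLast hne).1 ≠ -1 := by omega
      simp [pvIdxOf, hget, hne']

theorem pvPickB_cons (q : List (Int × List (String × String)))
    (hq : ∀ jr ∈ q, (0 : Int) ≤ jr.1) (d p : String) (rest : List (String × String)) :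
    pvPickB q ((d, p) :: rest) =
      if (pvIdxOf (pvOcc q d) != -1) && (pvIdxOf (pvOcc q p) != -1) then
        if pvCodOf (pvOcc q p) then pvIdxOf (pvOcc q p) else pvIdxOf (pvOcc q d)
      else pvPickB q rest := by
  rw [pvIdxOf_ne _ (pvOcc_pos q hq d), pvIdxOf_ne _ (pvOcc_pos q hq p)]
  show (if !(pvOcc q d).isEmpty && !(pvOcc q p).isEmpty then _ else pvPickB q rest) = _
  by_cases hc : (!(pvOcc q d).isEmpty && !(pvOcc q p).isEmpty) = true
  · obtain ⟨hod, hop⟩ := Bool.and_eq_true_iff.mp hc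
    rw [if_pos hc, if_pos hc]
    simp only [Bool.not_eq_eq_eq_not, Bool.not_true] at hod hop
    simp [pvIdxOf, pvCodOf, hod, hop]
  · rw [if_neg hc, if_neg hc]

theorem pvMain (recs : List (List (String × String))) :
    get_correct_cpg_transcript recs = get_correct_cpg_transcript_alt recs := by
  unfold get_correct_cpg_transcript get_correct_cpg_transcript_alt
  by_cases h1 : recs.length == 1
  · simp [h1]
  · simp only [h1, Bool.false_eq_true, if_false]
    rw [pvFoldA_eq]
    have hpos : ∀ jr ∈ PySem.List.enumerate recs 0, (0 : Int) ≤ jr.1 := by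
      intro jr hjr
      rw [PySem.List.mem_enumerate_iff] at hjr
      obtain ⟨k, hk, rfl⟩ := hjr
      simp
    obtain ⟨hb, hd⟩ := pvFoldA_char (PySem.List.enumerate recs 0) hpos
    have hqpos : ∀ jr ∈ pvQual recs, (0 : Int) ≤ jr.1 := by
      intro jr hjr
      exact hpos jr (List.mem_of_mem_filter hjr)
    have hg : ∀ g ∈ pvGenes,
        ((PySem.List.enumerate recs 0).foldl pvStepA' (0, pvInitDictA)).2.getD g (-1, false)
          = (pvIdxOf (pvOcc (pvQual recs) g), pvCodOf (pvOcc (pvQual recs) g)) := by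
      intro g hgm
      rw [PySem.Dict.getD_eq_get?_getD, hd g, if_pos hgm]; rfl
    rw [show pvPairsB.reverse
        = [("TSC2", "NTHL1"), ("XPC", "TMEM43"), ("PTEN", "KLLN")] from rfl,
      pvPickB_cons _ hqpos _ _ _, pvPickB_cons _ hqpos _ _ _, pvPickB_cons _ hqpos _ _ _]
    simp only [hg "KLLN" (by decide), hg "PTEN" (by decide), hg "XPC" (by decide),
      hg "TMEM43" (by decide), hg "NTHL1" (by decide), hg "TSC2" (by decide), hb]
    rw [Bool.and_comm ((pvIdxOf (pvOcc (pvQual recs) "KLLN")) != -1)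
          ((pvIdxOf (pvOcc (pvQual recs) "PTEN")) != -1),
        Bool.and_comm ((pvIdxOf (pvOcc (pvQual recs) "XPC")) != -1)
          ((pvIdxOf (pvOcc (pvQual recs) "TMEM43")) != -1),
        Bool.and_comm ((pvIdxOf (pvOcc (pvQual recs) "TSC2")) != -1)
          ((pvIdxOf (pvOcc (pvQual recs) "NTHL1")) != -1)]
    rfl

-- ===== VERDICT (by name: the statement is the Claim_ definition above) =====
theorem get_correct_cpg_transcript_spec : Claim_equal_get_correct_cpg_transcript := by
  intro recs _ _
  unfold Spec_get_correct_cpg_transcript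
  exact pvMain recs
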